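-- pv_equiv track=rewrite | github.com/wesleyphin/JULIE | de3_v4_bracket_trainer.py | _split_type_and_tag
-- ===== SOURCE A (Python) =====
-- from typing import Any, Dict, Iterable, List, Optional, Tuple
--
-- def _split_type_and_tag(type_text: str) -> Tuple[str, str]:
--     text = str(type_text or "").strip()
--     for prefix in ("Long_Rev", "Short_Rev", "Long_Mom", "Short_Mom"):
--         if text == prefix:
--             return prefix, ""
--         if text.startswith(prefix + "_"):
--             return prefix, text[len(prefix) + 1 :]
--     return text, ""
-- ===== SOURCE B (Python) =====
-- def _split_type_and_tag(type_text):
--     text = str(type_text or "").strip()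
--     parts = text.split("_")
--     head = "_".join(parts[:2])
--     if head in {"Long_Rev", "Short_Rev", "Long_Mom", "Short_Mom"}:
--         return head, "_".join(parts[2:])
--     return text, ""
-- ===== Notes on version B (the rewrite author's own statement) =====
-- stated objective: idiomatic
-- what changed: B strips and splits the text on '_' once, forms '_'.join(parts[:2]) and tests it against a set of the four known prefixes, instead of A's loop that compares and startswith-scans each prefix in turn.
import Mathlib
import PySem

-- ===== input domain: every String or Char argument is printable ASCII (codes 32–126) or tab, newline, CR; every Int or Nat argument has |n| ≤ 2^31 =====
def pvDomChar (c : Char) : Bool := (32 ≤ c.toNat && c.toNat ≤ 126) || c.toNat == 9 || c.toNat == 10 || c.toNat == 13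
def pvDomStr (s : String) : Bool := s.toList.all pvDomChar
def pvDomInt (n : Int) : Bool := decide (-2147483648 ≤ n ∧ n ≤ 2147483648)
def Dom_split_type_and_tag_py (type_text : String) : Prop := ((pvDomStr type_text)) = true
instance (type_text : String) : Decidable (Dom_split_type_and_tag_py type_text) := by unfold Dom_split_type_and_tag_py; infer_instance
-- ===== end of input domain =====

-- B strips and splits the text on '_' once, then tests '_'.join(parts[:2]) against a set of the
-- four known prefixes, instead of A's per-prefix equality/startswith scan. Objective: idiomatic.

-- ===== PORT A =====
-- the tuple of prefixes A's for-loop iterates over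
def pvPrefixes : List (List Char) :=
  ["Long_Rev".toList, "Short_Rev".toList, "Long_Mom".toList, "Short_Mom".toList]

-- A's for-loop: first matching prefix returns; fallthrough returns (text, "")
def pvALoop : List (List Char) → List Char → String × String
  | [], text => (String.ofList text, "")
  | p :: ps, text =>
    if text = p then (String.ofList p, "")
    else if PySem.Chars.startswith text (p ++ ['_']) then
      (String.ofList p, String.ofList (PySem.Chars.slice text (some ((p.length : Int) + 1)) none))
    else pvALoop ps text

def split_type_and_tag_py (type_text : String) : String × String :=
  let text := PySem.Chars.strip (if type_text = "" then "" else type_text).toList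
  pvALoop pvPrefixes text

-- ===== PORT B =====
-- the set literal B tests membership in
def pvKnownPrefixes : PySem.Set (List Char) :=
  PySem.Set.ofList ["Long_Rev".toList, "Short_Rev".toList, "Long_Mom".toList, "Short_Mom".toList]

def split_type_and_tag_py_alt (type_text : String) : String × String :=
  let text := PySem.Chars.strip (if type_text = "" then "" else type_text).toList
  let parts := PySem.Chars.splitOn text ['_']
  let head := PySem.Chars.join ['_'] (parts.take 2)
  if head ∈ pvKnownPrefixes then
    (String.ofList head, String.ofList (PySem.Chars.join ['_'] (parts.drop 2)))
  else (String.ofList text, "")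

-- ===== PRECONDITION & SPEC =====
def Spec_split_type_and_tag_py (type_text : String) (out : String × String) : Prop := out = split_type_and_tag_py_alt type_text
instance (type_text : String) (out : String × String) : Decidable (Spec_split_type_and_tag_py type_text out) := by unfold Spec_split_type_and_tag_py; infer_instance

-- ===== CLAIM (what is proved, stated in full; the proofs are below) =====
def Claim_equal_split_type_and_tag_py : Prop := ∀ (type_text : String), Dom_split_type_and_tag_py type_text → Spec_split_type_and_tag_py type_text (split_type_and_tag_py type_text)

-- ===== LEMMAS AND PROOFS =====

def pvSplitU : List Char → List (List Char)
  | [] => [[]]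
  | c :: rest =>
    if c = '_' then [] :: pvSplitU rest
    else match pvSplitU rest with
      | p :: ps => (c :: p) :: ps
      | [] => [[c]]

theorem pvSplitU_ne_nil (l : List Char) : pvSplitU l ≠ [] := by
  cases l with
  | nil => simp [pvSplitU]
  | cons c rest =>
    simp only [pvSplitU]
    split_ifs
    · simp
    · cases h : pvSplitU rest <;> simp

theorem pvGo_eq : ∀ (fuel : Nat) (l cur : List Char) (acc : List (List Char)), l.length ≤ fuel →
    PySem.Chars.splitOn.go ['_'] fuel l cur acc =
      acc.reverse ++ (pvSplitU l).modifyHead (cur.reverse ++ ·) := by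
  intro fuel
  induction fuel with
  | zero =>
    intro l cur acc h
    rw [List.length_eq_zero_iff.mp (Nat.le_zero.mp h)]
    rw [PySem.Chars.splitOn.go]
    simp [pvSplitU]
  | succ fuel ih =>
    intro l cur acc h
    cases l with
    | nil => rw [PySem.Chars.splitOn.go]; simp [pvSplitU]; omega
    | cons c rest =>
      rw [PySem.Chars.splitOn.go]
      by_cases hc : c = '_'
      · subst hc
        have hpre : List.isPrefixOf ['_'] ('_'::rest) = true := by
          simp [List.isPrefixOf]
        simp only [hpre, if_pos, List.length_cons, List.drop_succ_cons, List.length_nil, List.drop_zero]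
        rw [ih rest [] (cur.reverse :: acc) (by simpa using h)]
        have hne := pvSplitU_ne_nil rest
        cases hs : pvSplitU rest with
        | nil => exact absurd hs hne
        | cons p ps => simp [pvSplitU, hs]
      · have hpre : List.isPrefixOf ['_'] (c::rest) = false := by
          simp [List.isPrefixOf]; exact fun e => hc e.symm
        simp only [hpre]
        rw [if_neg (by simp)]
        rw [ih rest (c::cur) acc (by simpa using h)]
        have hne := pvSplitU_ne_nil rest
        cases hs : pvSplitU rest with
        | nil => exact absurd hs hne
        | cons p ps => simp [pvSplitU, hc, hs]

theorem pvSplitOn_eq (l : List Char) : PySem.Chars.splitOn l ['_'] = pvSplitU l := by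
  rw [PySem.Chars.splitOn, pvGo_eq (l.length+1) l [] [] (by omega)]
  have hne := pvSplitU_ne_nil l
  cases hs : pvSplitU l with
  | nil => exact absurd hs hne
  | cons p ps => simp

theorem pvJoin_cons (p q : List Char) (rest : List (List Char)) :
    PySem.Chars.join ['_'] (p :: q :: rest) = p ++ '_' :: PySem.Chars.join ['_'] (q :: rest) := by
  rw [PySem.Chars.join_cons_cons]; simp

theorem pvSplitU_no_sep (l : List Char) : ∀ p ∈ pvSplitU l, '_' ∉ p := by
  induction l with
  | nil => simp [pvSplitU]
  | cons c rest ih =>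
    simp only [pvSplitU]
    by_cases hc : c = '_'
    · simp [hc]; exact ih
    · rw [if_neg hc]
      have hne := pvSplitU_ne_nil rest
      cases hs : pvSplitU rest with
      | nil => exact absurd hs hne
      | cons p ps =>
        intro q hq
        rcases List.mem_cons.mp hq with h1 | h2
        · subst h1
          intro hm
          rcases List.mem_cons.mp hm with h | h
          · exact hc h.symm
          · exact ih p (by simp [hs]) h
        · exact ih q (by simp [hs, h2])

theorem pvSplitU_append (a b : List Char) (h : '_' ∉ a) :
    pvSplitU (a ++ '_' :: b) = a :: pvSplitU b := by
  induction a with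
  | nil => simp [pvSplitU]
  | cons c rest ih =>
    have hc : c ≠ '_' := fun e => h (by simp [e])
    have hr := ih (fun hm => h (by simp [hm]))
    simp [pvSplitU, hc, hr]

theorem pvJoin_splitU (l : List Char) : PySem.Chars.join ['_'] (pvSplitU l) = l := by
  induction l with
  | nil => simp [pvSplitU, PySem.Chars.join_singleton]
  | cons c rest ih =>
    by_cases hc : c = '_'
    · subst hc
      have hne := pvSplitU_ne_nil rest
      cases hs : pvSplitU rest with
      | nil => exact absurd hs hne
      | cons p ps =>
        have h0 : pvSplitU ('_'::rest) = [] :: p :: ps := by simp [pvSplitU, hs]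
        rw [h0, pvJoin_cons, ← hs, ih]
        simp
    · have hne := pvSplitU_ne_nil rest
      cases hs : pvSplitU rest with
      | nil => exact absurd hs hne
      | cons p ps =>
        simp only [pvSplitU, if_neg hc, hs]
        cases ps with
        | nil =>
          rw [PySem.Chars.join_singleton]
          rw [hs] at ih
          rw [PySem.Chars.join_singleton] at ih
          simp [ih]
        | cons q qs =>
          rw [pvJoin_cons]
          rw [hs] at ih
          rw [pvJoin_cons] at ih
          simp [← ih]

theorem pvUniq (a : List Char) : ∀ (c b d : List Char), '_' ∉ a → '_' ∉ c →
    a ++ '_' :: b = c ++ '_' :: d → a = c ∧ b = d := by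
  induction a with
  | nil =>
    intro c b d _ hc he
    cases c with
    | nil => simpa using he
    | cons x xs =>
      simp at he
      exact absurd (by simp [← he.1]) hc
  | cons x xs ih =>
    intro c b d ha hc he
    cases c with
    | nil =>
      simp at he
      exact absurd (by simp [he.1]) ha
    | cons y ys =>
      simp at he
      obtain ⟨hxy, hrest⟩ := he
      obtain ⟨h1, h2⟩ := ih ys b d (fun m => ha (by simp [m])) (fun m => hc (by simp [m])) hrest
      exact ⟨by simp [hxy, h1], h2⟩

def pvBCore (cs : List Char) : String × String :=
  let parts := pvSplitU cs
  let head := PySem.Chars.join ['_'] (parts.take 2)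
  if head ∈ pvKnownPrefixes then
    (String.ofList head, String.ofList (PySem.Chars.join ['_'] (parts.drop 2)))
  else (String.ofList cs, "")

theorem pvHead_eq (cs w1 w2 : List Char) (h1 : '_' ∉ w1) (hh : PySem.Chars.join ['_'] ((pvSplitU cs).take 2) = w1 ++ '_' :: w2) :
    cs = w1 ++ '_' :: w2 ∨ ∃ t, cs = w1 ++ '_' :: (w2 ++ '_' :: t) := by
  have hne := pvSplitU_ne_nil cs
  rcases hs : pvSplitU cs with _ | ⟨q1, qs⟩
  · exact absurd hs hne
  · cases qs with
    | nil =>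
      rw [hs] at hh
      simp only [List.take, PySem.Chars.join_singleton] at hh
      have : '_' ∉ q1 := pvSplitU_no_sep cs q1 (by simp [hs])
      rw [hh] at this
      exact absurd (by simp) this
    | cons q2 qs' =>
      rw [hs] at hh
      have htk : (q1 :: q2 :: qs').take 2 = [q1, q2] := by simp
      rw [htk, pvJoin_cons, PySem.Chars.join_singleton] at hh
      have hq1 : '_' ∉ q1 := pvSplitU_no_sep cs q1 (by simp [hs])
      obtain ⟨e1, e2⟩ := pvUniq q1 w1 q2 w2 hq1 h1 hh
      have hcs : cs = PySem.Chars.join ['_'] (pvSplitU cs) := (pvJoin_splitU cs).symm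
      rw [hs, e1, e2] at hcs
      cases qs' with
      | nil =>
        left
        rw [hcs, pvJoin_cons, PySem.Chars.join_singleton]
      | cons r rs =>
        right
        refine ⟨PySem.Chars.join ['_'] (r :: rs), ?_⟩
        rw [hcs, pvJoin_cons, pvJoin_cons]

theorem pvBCore_tag (w1 w2 t : List Char) (h1 : '_' ∉ w1) (h2 : '_' ∉ w2)
    (hmem : (w1 ++ '_' :: w2) ∈ pvKnownPrefixes) :
    pvBCore (w1 ++ '_' :: (w2 ++ '_' :: t)) = (String.ofList (w1 ++ '_' :: w2), String.ofList t) := by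
  unfold pvBCore
  rw [pvSplitU_append _ _ h1, pvSplitU_append _ _ h2]
  have htk : (w1 :: w2 :: pvSplitU t).take 2 = [w1, w2] := by simp
  have hdr : (w1 :: w2 :: pvSplitU t).drop 2 = pvSplitU t := by simp
  simp only [htk, hdr, pvJoin_cons, PySem.Chars.join_singleton, pvJoin_splitU]
  rw [if_pos hmem]

theorem pvDrop (p : List Char) (c : Char) (t : List Char) :
    List.drop (p.length + 1) (p ++ c :: t) = t := by
  induction p <;> simp [*]

theorem pvMain (cs : List Char) : pvALoop pvPrefixes cs = pvBCore cs := by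
  simp only [pvPrefixes, pvALoop]
  by_cases e1 : cs = "Long_Rev".toList
  · subst e1; decide
  rw [if_neg e1]
  by_cases s1 : PySem.Chars.startswith cs ("Long_Rev".toList ++ ['_']) = true
  · rw [if_pos s1]
    obtain ⟨t, ht⟩ := (PySem.Chars.startswith_iff _ _).mp s1
    have hcs2 : cs = "Long_Rev".toList ++ '_' :: t := by rw [← ht]; simp
    have hsl : PySem.Chars.slice cs (some ((("Long_Rev".toList).length : Int) + 1)) none = t := by
      rw [hcs2]
      simp only [PySem.Chars.slice_eq_listSlice]
      rw [PySem.List.slice_from _ (by omega)]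
      have hN : ((("Long_Rev".toList).length : Int) + 1).toNat = ("Long_Rev".toList).length + 1 := by omega
      rw [hN, pvDrop]
    rw [hsl]
    have hcs : cs = "Long".toList ++ '_' :: ("Rev".toList ++ '_' :: t) := by rw [hcs2]; rfl
    rw [hcs, pvBCore_tag _ _ _ (by decide) (by decide) (by decide)]
    rfl
  rw [if_neg s1]
  by_cases e2 : cs = "Short_Rev".toList
  · subst e2; decide
  rw [if_neg e2]
  by_cases s2 : PySem.Chars.startswith cs ("Short_Rev".toList ++ ['_']) = true
  · rw [if_pos s2]
    obtain ⟨t, ht⟩ := (PySem.Chars.startswith_iff _ _).mp s2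
    have hcs2 : cs = "Short_Rev".toList ++ '_' :: t := by rw [← ht]; simp
    have hsl : PySem.Chars.slice cs (some ((("Short_Rev".toList).length : Int) + 1)) none = t := by
      rw [hcs2]
      simp only [PySem.Chars.slice_eq_listSlice]
      rw [PySem.List.slice_from _ (by omega)]
      have hN : ((("Short_Rev".toList).length : Int) + 1).toNat = ("Short_Rev".toList).length + 1 := by omega
      rw [hN, pvDrop]
    rw [hsl]
    have hcs : cs = "Short".toList ++ '_' :: ("Rev".toList ++ '_' :: t) := by rw [hcs2]; rfl
    rw [hcs, pvBCore_tag _ _ _ (by decide) (by decide) (by decide)]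
    rfl
  rw [if_neg s2]
  by_cases e3 : cs = "Long_Mom".toList
  · subst e3; decide
  rw [if_neg e3]
  by_cases s3 : PySem.Chars.startswith cs ("Long_Mom".toList ++ ['_']) = true
  · rw [if_pos s3]
    obtain ⟨t, ht⟩ := (PySem.Chars.startswith_iff _ _).mp s3
    have hcs2 : cs = "Long_Mom".toList ++ '_' :: t := by rw [← ht]; simp
    have hsl : PySem.Chars.slice cs (some ((("Long_Mom".toList).length : Int) + 1)) none = t := by
      rw [hcs2]
      simp only [PySem.Chars.slice_eq_listSlice]
      rw [PySem.List.slice_from _ (by omega)]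
      have hN : ((("Long_Mom".toList).length : Int) + 1).toNat = ("Long_Mom".toList).length + 1 := by omega
      rw [hN, pvDrop]
    rw [hsl]
    have hcs : cs = "Long".toList ++ '_' :: ("Mom".toList ++ '_' :: t) := by rw [hcs2]; rfl
    rw [hcs, pvBCore_tag _ _ _ (by decide) (by decide) (by decide)]
    rfl
  rw [if_neg s3]
  by_cases e4 : cs = "Short_Mom".toList
  · subst e4; decide
  rw [if_neg e4]
  by_cases s4 : PySem.Chars.startswith cs ("Short_Mom".toList ++ ['_']) = true
  · rw [if_pos s4]
    obtain ⟨t, ht⟩ := (PySem.Chars.startswith_iff _ _).mp s4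
    have hcs2 : cs = "Short_Mom".toList ++ '_' :: t := by rw [← ht]; simp
    have hsl : PySem.Chars.slice cs (some ((("Short_Mom".toList).length : Int) + 1)) none = t := by
      rw [hcs2]
      simp only [PySem.Chars.slice_eq_listSlice]
      rw [PySem.List.slice_from _ (by omega)]
      have hN : ((("Short_Mom".toList).length : Int) + 1).toNat = ("Short_Mom".toList).length + 1 := by omega
      rw [hN, pvDrop]
    rw [hsl]
    have hcs : cs = "Short".toList ++ '_' :: ("Mom".toList ++ '_' :: t) := by rw [hcs2]; rfl
    rw [hcs, pvBCore_tag _ _ _ (by decide) (by decide) (by decide)]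
    rfl
  rw [if_neg s4]
  unfold pvBCore
  rw [if_neg ?hno]
  case hno =>
    intro hmem
    simp only [pvKnownPrefixes, PySem.Set.mem_ofList, List.mem_cons,
      List.not_mem_nil, or_false] at hmem
    rcases hmem with hh | hh | hh | hh
    · have hh' : PySem.Chars.join ['_'] ((pvSplitU cs).take 2) = "Long".toList ++ '_' :: "Rev".toList := by rw [hh]; rfl
      rcases pvHead_eq cs _ _ (by decide) hh' with hL | ⟨t, hT⟩
      · exact e1 hL
      · exact s1 ((PySem.Chars.startswith_iff _ _).mpr ⟨t, by rw [hT]; rfl⟩)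
    · have hh' : PySem.Chars.join ['_'] ((pvSplitU cs).take 2) = "Short".toList ++ '_' :: "Rev".toList := by rw [hh]; rfl
      rcases pvHead_eq cs _ _ (by decide) hh' with hL | ⟨t, hT⟩
      · exact e2 hL
      · exact s2 ((PySem.Chars.startswith_iff _ _).mpr ⟨t, by rw [hT]; rfl⟩)
    · have hh' : PySem.Chars.join ['_'] ((pvSplitU cs).take 2) = "Long".toList ++ '_' :: "Mom".toList := by rw [hh]; rfl
      rcases pvHead_eq cs _ _ (by decide) hh' with hL | ⟨t, hT⟩
      · exact e3 hL
      · exact s3 ((PySem.Chars.startswith_iff _ _).mpr ⟨t, by rw [hT]; rfl⟩)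
    · have hh' : PySem.Chars.join ['_'] ((pvSplitU cs).take 2) = "Short".toList ++ '_' :: "Mom".toList := by rw [hh]; rfl
      rcases pvHead_eq cs _ _ (by decide) hh' with hL | ⟨t, hT⟩
      · exact e4 hL
      · exact s4 ((PySem.Chars.startswith_iff _ _).mpr ⟨t, by rw [hT]; rfl⟩)

-- ===== VERDICT (by name: the statement is the Claim_ definition above) =====
theorem split_type_and_tag_py_spec : Claim_equal_split_type_and_tag_py := by
  intro type_text _
  unfold Spec_split_type_and_tag_py split_type_and_tag_py split_type_and_tag_py_alt
  simp only [pvSplitOn_eq]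
  exact pvMain _
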